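-- pv_equiv track=rewrite | github.com/valentinarodrigues/daily-problem-solver | decode_string.py | stacky
-- ===== SOURCE A (Python) =====
-- def stacky(s):
--     """
--     When we hit an open bracket, we know we have parsed k for the contents of the bracket, so
--     push (current_string, k) to the stack, so we can pop them on closing bracket to duplicate
--     the enclosed string k times.
--     """
--     stack = []
--     current_string = ""
--     k = 0
--
--     for char in s:
--         if char == "[":
--             # Just finished parsing this k, save current string and k for when we pop
--             stack.append((current_string, k))
--             # Reset current_string and k for this new frame
--             current_string = ""
--             k = 0
--         elif char == "]":
--             # We have completed this frame, get the last current_string and k from when the frame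
--             # opened, which is the k we need to duplicate the current current_string by
--             last_string, last_k = stack.pop()
--             current_string = last_string + last_k * current_string
--         elif char.isdigit():
--             k = k * 10 + int(char)
--         else:
--             current_string += char
--
--     return current_string
-- ===== SOURCE B (Python) =====
-- def stacky(s):
--     # Recursive-descent parser: decode(i) parses one frame starting at index i,
--     # returning (decoded string, index of the terminating ']' or len(s)).
--     def decode(i):
--         res = []
--         k = 0
--         while i < len(s):
--             c = s[i]
--             if c == "]":
--                 return "".join(res), i
--             i += 1
--             if c == "[":
--                 inner, j = decode(i)
--                 res.append(k * inner)
--                 k = 0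
--                 i = j + 1
--             elif c.isdigit():
--                 k = k * 10 + int(c)
--             else:
--                 res.append(c)
--         return "".join(res), i
--     res, j = decode(0)
--     if j < len(s):
--         # a ']' with no matching '[': corrupt encoding, same error class as A
--         raise IndexError("unmatched ']'")
--     return res
-- ===== Notes on version B (the rewrite author's own statement) =====
-- stated objective: alternative
-- what changed: Replaced A's explicit (string, count) stack machine over the characters by a recursive-descent parser decode(i) that parses one bracket frame at a time, recursing on '[' and returning (decoded, stop index) on ']', using the call stack instead of the explicit stack.
-- outside the precondition, e.g. on stacky('a[b'): A returns 'b', B returns 'a'; on stacky('2[3][x]'): A returns 'xxx', B returns ''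
import Mathlib
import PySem

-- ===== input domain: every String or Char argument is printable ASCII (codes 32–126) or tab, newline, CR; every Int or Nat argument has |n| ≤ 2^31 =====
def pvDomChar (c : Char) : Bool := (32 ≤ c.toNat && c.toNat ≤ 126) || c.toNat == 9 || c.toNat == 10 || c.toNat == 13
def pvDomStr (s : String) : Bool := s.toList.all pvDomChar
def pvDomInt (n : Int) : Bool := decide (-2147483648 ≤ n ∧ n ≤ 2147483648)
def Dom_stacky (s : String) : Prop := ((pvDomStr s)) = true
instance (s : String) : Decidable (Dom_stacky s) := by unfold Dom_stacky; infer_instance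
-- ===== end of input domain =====

-- B replaces A's explicit (string, k) stack machine by a recursive-descent parser
-- (objective: alternative decomposition, same cost; return-value equivalence only).

-- Python's  k * current_string  (k ≥ 0 here): k copies of the char list, concatenated.
def rep (n : Nat) (x : List Char) : List Char := (List.replicate n x).flatten

-- ===== PORT A =====
-- A's loop over the characters, state = (stack, current_string, k); chars are ASCII
-- (Dom), where Char.isDigit coincides with Python's str.isdigit.
def goA : List (List Char × Nat) → List Char → Nat → List Char → List Char
  | _, cur, _, [] => cur
  | stack, cur, k, c :: cs =>
    if c = '[' then goA ((cur, k) :: stack) [] 0 cs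
    else if c = ']' then
      match stack with
      | (ls, lk) :: st => goA st (ls ++ rep lk cur) k cs
      | [] => cur  -- Python raises IndexError here (stack.pop() on []); excluded by Pre_stacky
    else if c.isDigit then goA stack cur (k * 10 + (c.toNat - 48)) cs
    else goA stack (cur ++ [c]) k cs

def stacky (s : String) : String := String.ofList (goA [] [] 0 s.toList)

-- ===== PORT B =====
-- B's decode(i): parse one frame, returning (decoded, list starting at the frame's
-- terminating ']', or [] at end of input); on '[' the caller drops that ']' and
-- continues. The fuel argument only makes the recursion structural; length cs suffices.
def goB : Nat → List Char → List Char → Nat → (List Char × List Char)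
  | _, [], res, _ => (res, [])
  | 0, cs, res, _ => (res, cs)  -- fuel exhausted: unreachable when fuel ≥ length
  | f + 1, c :: cs, res, k =>
    if c = ']' then (res, c :: cs)
    else if c = '[' then
      let p := goB f cs [] 0
      goB f (p.2.drop 1) (res ++ rep k p.1) 0
    else if c.isDigit then goB f cs res (k * 10 + (c.toNat - 48))
    else goB f cs (res ++ [c]) k

-- B's top level checks decode consumed the whole input and raises IndexError on a
-- stray top-level ']' (as A does there); such inputs are excluded by Pre_stacky,
-- so the port returns the accumulated result in that (unclaimed) case.
def stacky_alt (s : String) : String :=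
  String.ofList (goB s.toList.length s.toList [] 0).1

-- ===== PRECONDITION & SPEC =====
-- bracket weight and depth of a prefix
def wC (c : Char) : Int := if c = '[' then 1 else if c = ']' then -1 else 0
def dep (l : List Char) : Int := (l.map wC).sum

-- Pre_stacky restricts to well-formed encodings: brackets balanced (on an unmatched
-- ']' both A and B raise IndexError; on an unclosed '[' A's value — the innermost
-- frame only — is an artefact of its unpopped stack) and no nonzero digit reaches a
-- ']' before a '[' consumes it (there A leaks the pending count into the following
-- frame, B's parser discards it; on such malformed strings neither value is specified).
def Pre_stacky (s : String) : Prop :=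
  (∀ n ∈ List.range (s.toList.length + 1), 0 ≤ dep (s.toList.take n)) ∧
  dep s.toList = 0 ∧
  (∀ j ∈ List.range s.toList.length, s.toList.getD j ' ' = ']' →
    ∀ i ∈ List.range j, ('1' ≤ s.toList.getD i ' ' ∧ s.toList.getD i ' ' ≤ '9') →
      ∃ m ∈ List.range j, i < m ∧ s.toList.getD m ' ' = '[')
instance (s : String) : Decidable (Pre_stacky s) := by unfold Pre_stacky; infer_instance

def pvWitness_stacky : String := "2[a10[bc]]x"

def Spec_stacky (s : String) (out : String) : Prop := out = stacky_alt s
instance (s : String) (out : String) : Decidable (Spec_stacky s out) := by unfold Spec_stacky; infer_instance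

-- ===== CLAIM (what is proved, stated in full; the proofs are below) =====
def Claim_equal_stacky : Prop := ∀ (s : String), Dom_stacky s → Pre_stacky s → Spec_stacky s (stacky s)

-- ===== LEMMAS AND PROOFS =====

-- Grammar of well-formed input:
-- FrameRun cs k rest: scanning cs with pending count k, one frame closes at a ']'
-- (with count 0 there) leaving rest; TopRun cs: scanning cs reaches the end of the
-- input, every bracket inside well-formed.
inductive FrameRun : List Char → Nat → List Char → Prop
  | close (cs : List Char) : FrameRun (']' :: cs) 0 cs
  | open_ {cs₁ rest₁ rest : List Char} (k : Nat) :
      FrameRun cs₁ 0 rest₁ → FrameRun rest₁ 0 rest → FrameRun ('[' :: cs₁) k rest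
  | digit {c : Char} {cs rest : List Char} {k : Nat} :
      c.isDigit → FrameRun cs (k * 10 + (c.toNat - 48)) rest → FrameRun (c :: cs) k rest
  | other {c : Char} {cs rest : List Char} {k : Nat} :
      c ≠ '[' → c ≠ ']' → ¬ c.isDigit → FrameRun cs k rest → FrameRun (c :: cs) k rest

inductive TopRun : List Char → Prop
  | nil : TopRun []
  | open_ {cs₁ rest : List Char} : FrameRun cs₁ 0 rest → TopRun rest → TopRun ('[' :: cs₁)
  | skip {c : Char} {cs : List Char} : c ≠ '[' → c ≠ ']' → TopRun cs → TopRun (c :: cs)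

theorem isDigit_ne_brackets {c : Char} (h : c.isDigit) : c ≠ '[' ∧ c ≠ ']' := by
  constructor <;> rintro rfl <;> revert h <;> decide

theorem isDigit_range {c : Char} (h : c.isDigit) (hv : c.toNat - 48 ≠ 0) :
    '1' ≤ c ∧ c ≤ '9' := by
  simp [Char.isDigit] at h
  simp only [Char.le_def, UInt32.le_iff_toNat_le, Char.toNat] at *
  have e1 : (48:UInt32).toNat = 48 := rfl
  have e2 : (57:UInt32).toNat = 57 := rfl
  have e3 : ('1'.val).toNat = 49 := rfl
  have e4 : ('9'.val).toNat = 57 := rfl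
  omega

theorem FrameRun_length {cs rest : List Char} {k : Nat} (h : FrameRun cs k rest) :
    rest.length < cs.length := by
  induction h with
  | close cs => simp
  | open_ k h₁ h₂ ih₁ ih₂ => simp; omega
  | digit hd h ih => simp; omega
  | other h1 h2 h3 h ih => simp; omega

-- simulation of one frame: A with a pushed (ls, lk) behaves like B's recursive call
theorem frame_sim {cs rest : List Char} {k : Nat} (h : FrameRun cs k rest) :
    ∀ f res ls lk stack, cs.length ≤ f →
      goA ((ls, lk) :: stack) res k cs
        = goA stack (ls ++ rep lk (goB f cs res k).1) 0 ((goB f cs res k).2.drop 1)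
      ∧ (goB f cs res k).2 = ']' :: rest := by
  induction h with
  | close cs =>
    intro f res ls lk stack hf
    match f with
    | f + 1 => simp [goA, goB]
  | @open_ cs₁ rest₁ rest k h₁ h₂ ih₁ ih₂ =>
    intro f res ls lk stack hf
    match f with
    | f + 1 =>
      simp only [List.length_cons] at hf
      have hf₁ : cs₁.length ≤ f := by omega
      have hf₂ : rest₁.length ≤ f := by have := FrameRun_length h₁; omega
      have e₁ := ih₁ f [] res k ((ls, lk) :: stack) hf₁
      have e₂ := ih₂ f (res ++ rep k (goB f cs₁ [] 0).1) ls lk stack hf₂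
      have hA : goA ((ls, lk) :: stack) res k ('[' :: cs₁)
          = goA ((res, k) :: (ls, lk) :: stack) [] 0 cs₁ := by simp [goA]
      have hB : goB (f + 1) ('[' :: cs₁) res k
          = goB f ((goB f cs₁ [] 0).2.drop 1) (res ++ rep k (goB f cs₁ [] 0).1) 0 := by
        simp [goB]
      have hdrop : (goB f cs₁ [] 0).2.drop 1 = rest₁ := by rw [e₁.2]; rfl
      constructor
      · rw [hA, e₁.1, hB, hdrop]
        exact e₂.1
      · rw [hB, hdrop]
        exact e₂.2
  | @digit c cs rest k hd h ih =>
    intro f res ls lk stack hf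
    match f with
    | f + 1 =>
      simp only [List.length_cons] at hf
      obtain ⟨h1, h2⟩ := isDigit_ne_brackets hd
      have := ih f res ls lk stack (by omega)
      simpa [goA, goB, h1, h2, hd] using this
  | @other c cs rest k h1 h2 h3 h ih =>
    intro f res ls lk stack hf
    match f with
    | f + 1 =>
      simp only [List.length_cons] at hf
      have := ih f (res ++ [c]) ls lk stack (by omega)
      simpa [goA, goB, h1, h2, h3] using this

theorem top_sim {cs : List Char} (h : TopRun cs) :
    ∀ f k res stack, cs.length ≤ f → goA stack res k cs = (goB f cs res k).1 := by
  induction h with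
  | nil => intro f k res stack hf; cases f <;> simp [goA, goB]
  | @open_ cs₁ rest h₁ h₂ ih =>
    intro f k res stack hf
    match f with
    | f + 1 =>
      simp only [List.length_cons] at hf
      have e₁ := frame_sim h₁ f [] res k stack (by omega)
      have hf₂ : rest.length ≤ f := by have := FrameRun_length h₁; omega
      have e₂ := ih f 0 (res ++ rep k (goB f cs₁ [] 0).1) stack hf₂
      have hA : goA stack res k ('[' :: cs₁)
          = goA ((res, k) :: stack) [] 0 cs₁ := by simp [goA]
      have hB : goB (f + 1) ('[' :: cs₁) res k
          = goB f ((goB f cs₁ [] 0).2.drop 1) (res ++ rep k (goB f cs₁ [] 0).1) 0 := by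
        simp [goB]
      have hdrop : (goB f cs₁ [] 0).2.drop 1 = rest := by rw [e₁.2]; rfl
      rw [hA, e₁.1, hB, hdrop]
      exact e₂
  | @skip c cs h1 h2 h ih =>
    intro f k res stack hf
    match f with
    | f + 1 =>
      simp only [List.length_cons] at hf
      by_cases hd : c.isDigit
      · have := ih f (k * 10 + (c.toNat - 48)) res stack (by omega)
        simpa [goA, goB, h1, h2, hd] using this
      · have := ih f k (res ++ [c]) stack (by omega)
        simpa [goA, goB, h1, h2, hd] using this

-- ----- building TopRun from the counting precondition -----

-- unbounded forms of the two non-balance conditions, used inside the induction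
def NL (l : List Char) : Prop :=
  ∀ i j, i < j → j < l.length → ('1' ≤ l.getD i ' ' ∧ l.getD i ' ' ≤ '9') →
    l.getD j ' ' = ']' → ∃ m, i < m ∧ m < j ∧ l.getD m ' ' = '['

def INV (l : List Char) (k : Nat) : Prop :=
  k ≠ 0 → ∀ j, j < l.length → l.getD j ' ' = ']' → ∃ m, m < j ∧ l.getD m ' ' = '['

theorem dep_cons (c : Char) (l : List Char) : dep (c :: l) = wC c + dep l := by
  simp [dep]

theorem dep_append (a b : List Char) : dep (a ++ b) = dep a + dep b := by
  simp [dep]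

theorem wC_bounds (c : Char) : -1 ≤ wC c ∧ wC c ≤ 1 := by
  unfold wC; split_ifs <;> omega

theorem dep_take_step (l : List Char) (m : Nat) :
    dep (l.take m) - 1 ≤ dep (l.take (m + 1)) ∧ dep (l.take (m + 1)) ≤ dep (l.take m) + 1 := by
  induction l generalizing m with
  | nil => simp [dep]
  | cons c l ih =>
    cases m with
    | zero => have := wC_bounds c; simp [dep]; omega
    | succ m =>
      have := ih m
      simp only [List.take_succ_cons, dep_cons]
      omega

-- first dip to -1: minimal n with dep (take n) = -1, nonnegative before it
theorem find_dip (l : List Char) (j : Nat) (hj : dep (l.take j) ≤ -1) :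
    ∃ n, n ≤ j ∧ dep (l.take n) = -1 ∧ ∀ m < n, 0 ≤ dep (l.take m) := by
  classical
  have hex : ∃ n, dep (l.take n) ≤ -1 := ⟨j, hj⟩
  obtain ⟨n₀, hn₀, hminle, hmin⟩ :
      ∃ n₀, dep (l.take n₀) ≤ -1 ∧ n₀ ≤ j ∧ ∀ m < n₀, ¬ dep (l.take m) ≤ -1 :=
    ⟨Nat.find hex, Nat.find_spec hex, Nat.find_min' hex hj, fun m hm => Nat.find_min hex hm⟩
  have hpos : ∀ m < n₀, 0 ≤ dep (l.take m) := fun m hm => by have := hmin m hm; omega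
  have hne : n₀ ≠ 0 := by intro h; rw [h] at hn₀; simp [dep] at hn₀
  obtain ⟨m, rfl⟩ : ∃ m, n₀ = m + 1 := ⟨n₀ - 1, by omega⟩
  have h1 := dep_take_step l m
  have h2 := hpos m (by omega)
  exact ⟨m + 1, hminle, by omega, hpos⟩

theorem NL_cons {c : Char} {l : List Char} (h : NL (c :: l)) : NL l := by
  intro i j hij hj hdig hcl
  obtain ⟨m, hm1, hm2, hm3⟩ := h (i + 1) (j + 1) (by omega) (by simpa using hj)
    (by simpa using hdig) (by simpa using hcl)
  match m, hm1 with
  | m + 1, _ => exact ⟨m, by omega, by omega, by simpa using hm3⟩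

theorem NL_drop {l : List Char} (n : Nat) (h : NL l) : NL (l.drop n) := by
  induction n generalizing l with
  | zero => simpa using h
  | succ n ih =>
    cases l with
    | nil => simpa using h
    | cons c l => exact ih (NL_cons h)

theorem INV_digit {c : Char} {l : List Char} {k : Nat}
    (hnl : NL (c :: l)) (hd : c.isDigit) (hinv : INV (c :: l) k) :
    INV l (k * 10 + (c.toNat - 48)) := by
  intro hk j hj hcl
  by_cases hv : c.toNat - 48 = 0
  · -- c = '0'; then k ≠ 0 and INV of c :: l applies
    have hk0 : k ≠ 0 := by omega
    obtain ⟨m, hm1, hm2⟩ := hinv hk0 (j + 1) (by simpa using hj) (by simpa using hcl)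
    match m, hm2 with
    | 0, hm2 =>
      exfalso
      simp at hm2
      exact (isDigit_ne_brackets hd).1 hm2
    | m + 1, hm2 => exact ⟨m, by omega, by simpa using hm2⟩
  · -- c is a nonzero digit: NL at i = 0 gives a '[' before the ']'
    have hdig : '1' ≤ (c :: l).getD 0 ' ' ∧ (c :: l).getD 0 ' ' ≤ '9' := by
      simpa using isDigit_range hd hv
    obtain ⟨m, hm1, hm2, hm3⟩ := hnl 0 (j + 1) (by omega) (by simpa using hj) hdig
      (by simpa using hcl)
    match m, hm1 with
    | m + 1, _ => exact ⟨m, by omega, by simpa using hm3⟩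

theorem INV_other {c : Char} {l : List Char} {k : Nat}
    (hc : c ≠ '[') (hinv : INV (c :: l) k) : INV l k := by
  intro hk j hj hcl
  obtain ⟨m, hm1, hm2⟩ := hinv hk (j + 1) (by simpa using hj) (by simpa using hcl)
  match m, hm2 with
  | 0, hm2 => exact absurd (by simpa using hm2) hc
  | m + 1, hm2 => exact ⟨m, by omega, by simpa using hm2⟩

theorem dep_take_add (l : List Char) (n m : Nat) :
    dep (l.take (n + m)) = dep (l.take n) + dep ((l.drop n).take m) := by
  rw [List.take_add, dep_append]

theorem dep_drop (l : List Char) (n : Nat) :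
    dep (l.drop n) = dep l - dep (l.take n) := by
  have h : dep (l.take n ++ l.drop n) = dep (l.take n) + dep (l.drop n) := dep_append _ _
  rw [List.take_append_drop] at h
  omega

-- the main construction: counting conditions give a derivation
theorem build : ∀ N (l : List Char), l.length ≤ N → ∀ k, NL l → INV l k →
    ((∀ m, 0 ≤ dep (l.take m)) → dep l = 0 → TopRun l) ∧
    (∀ n, n ≤ l.length → dep (l.take n) = -1 → (∀ m < n, 0 ≤ dep (l.take m)) →
      FrameRun l k (l.drop n)) := by
  intro N
  induction N with
  | zero =>
    intro l hl k _ _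
    cases l with
    | nil =>
      refine ⟨fun _ _ => TopRun.nil, ?_⟩
      intro n hn hdip _
      obtain rfl : n = 0 := by simpa using hn
      simp [dep] at hdip
    | cons c l => simp at hl
  | succ N ih =>
    intro l hl k hnl hinv
    cases l with
    | nil =>
      refine ⟨fun _ _ => TopRun.nil, ?_⟩
      intro n hn hdip _
      obtain rfl : n = 0 := by simpa using hn
      simp [dep] at hdip
    | cons c l =>
      simp only [List.length_cons] at hl
      have hl' : l.length ≤ N := by omega
      constructor
      · -- (a) complete run to the end of the input
        intro hpos hz
        by_cases hco : c = '['
        · subst hco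
          have hdl : dep l = -1 := by rw [dep_cons] at hz; simp [wC] at hz; omega
          have hdip : dep (l.take l.length) ≤ -1 := by
            rw [List.take_of_length_le le_rfl]; omega
          obtain ⟨n', hn'le, hn'dip, hn'pos⟩ := find_dip l l.length hdip
          have hfr := (ih l hl' 0 (NL_cons hnl) (by intro h; omega)).2 n' hn'le hn'dip hn'pos
          have hrest : (l.drop n').length ≤ N := by rw [List.length_drop]; omega
          have hposR : ∀ m, 0 ≤ dep ((l.drop n').take m) := by
            intro m
            have h1 := hpos (n' + m + 1)
            rw [List.take_succ_cons, dep_cons] at h1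
            simp [wC] at h1
            have h2 := dep_take_add l n' m
            omega
          have hzR : dep (l.drop n') = 0 := by
            rw [dep_drop, hdl, hn'dip]; norm_num
          have htop := (ih (l.drop n') hrest 0 (NL_drop n' (NL_cons hnl))
            (by intro h; omega)).1 hposR hzR
          exact TopRun.open_ hfr htop
        · by_cases hcc : c = ']'
          · exfalso
            have := hpos 1
            subst hcc
            simp [dep, wC] at this
          · -- digit or other: step over the head character
            have hwc : wC c = 0 := by simp [wC, hco, hcc]
            have hposl : ∀ m, 0 ≤ dep (l.take m) := by
              intro m
              have := hpos (m + 1)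
              rw [List.take_succ_cons, dep_cons, hwc] at this
              omega
            have hzl : dep l = 0 := by rw [dep_cons, hwc] at hz; omega
            by_cases hd : c.isDigit
            · have := (ih l hl' (k * 10 + (c.toNat - 48)) (NL_cons hnl)
                (INV_digit hnl hd hinv)).1 hposl hzl
              exact TopRun.skip hco hcc this
            · have := (ih l hl' k (NL_cons hnl) (INV_other hco hinv)).1 hposl hzl
              exact TopRun.skip hco hcc this
      · -- (b) one frame, closing at position n
        intro n hn hdip hmin
        have hn0 : n ≠ 0 := by intro h; subst h; simp [dep] at hdip
        obtain ⟨n', rfl⟩ : ∃ n', n = n' + 1 := ⟨n - 1, by omega⟩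
        simp only [List.length_cons] at hn
        by_cases hcc : c = ']'
        · subst hcc
          have hn1 : n' = 0 := by
            by_contra h
            have := hmin 1 (by omega)
            simp [dep, wC] at this
          subst hn1
          have hk0 : k = 0 := by
            by_contra hk
            obtain ⟨m, hm1, hm2⟩ := hinv hk 0 (by simp) (by simp)
            omega
          subst hk0
          simpa using FrameRun.close l
        · by_cases hco : c = '['
          · subst hco
            rw [List.take_succ_cons, dep_cons] at hdip
            simp [wC] at hdip
            have hdip' : dep (l.take n') = -2 := by omega
            obtain ⟨n₁, hn₁le, hn₁dip, hn₁pos⟩ := find_dip l n' (by omega)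
            have hfr₁ := (ih l hl' 0 (NL_cons hnl) (by intro h; omega)).2 n₁
              (by omega) hn₁dip hn₁pos
            have hrest : (l.drop n₁).length ≤ N := by rw [List.length_drop]; omega
            have hminl : ∀ m < n', -1 ≤ dep (l.take m) := by
              intro m hm
              have := hmin (m + 1) (by omega)
              rw [List.take_succ_cons, dep_cons] at this
              simp [wC] at this
              omega
            have hdip₂ : dep ((l.drop n₁).take (n' - n₁)) = -1 := by
              have h2 := dep_take_add l n₁ (n' - n₁)
              rw [show n₁ + (n' - n₁) = n' from by omega] at h2
              omega
            have hmin₂ : ∀ m < n' - n₁, 0 ≤ dep ((l.drop n₁).take m) := by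
              intro m hm
              have h2 := dep_take_add l n₁ m
              have h3 := hminl (n₁ + m) (by omega)
              omega
            have hle₂ : n' - n₁ ≤ (l.drop n₁).length := by
              rw [List.length_drop]; omega
            have hfr₂ := (ih (l.drop n₁) hrest 0 (NL_drop n₁ (NL_cons hnl))
              (by intro h; omega)).2 (n' - n₁) hle₂ hdip₂ hmin₂
            have hdd : (l.drop n₁).drop (n' - n₁) = l.drop n' := by
              rw [List.drop_drop]
              congr 1
              omega
            rw [hdd] at hfr₂
            simpa using FrameRun.open_ k hfr₁ hfr₂
          · -- digit or other character in the frame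
            have hwc : wC c = 0 := by simp [wC, hco, hcc]
            rw [List.take_succ_cons, dep_cons, hwc] at hdip
            have hdip' : dep (l.take n') = -1 := by omega
            have hminl : ∀ m < n', 0 ≤ dep (l.take m) := by
              intro m hm
              have := hmin (m + 1) (by omega)
              rw [List.take_succ_cons, dep_cons, hwc] at this
              omega
            by_cases hd : c.isDigit
            · have hfr := (ih l hl' (k * 10 + (c.toNat - 48)) (NL_cons hnl)
                (INV_digit hnl hd hinv)).2 n' (by omega) hdip' hminl
              simpa using FrameRun.digit hd hfr
            · have hfr := (ih l hl' k (NL_cons hnl) (INV_other hco hinv)).2 n'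
                (by omega) hdip' hminl
              simpa using FrameRun.other hco hcc hd hfr

theorem pre_top {s : String} (h : Pre_stacky s) : TopRun s.toList := by
  obtain ⟨h1, h2, h3⟩ := h
  have hnl : NL s.toList := by
    intro i j hij hj hdig hcl
    obtain ⟨m, hm, hm2, hm3⟩ := h3 j (by simpa [List.mem_range] using hj) hcl i
      (by simpa [List.mem_range] using hij) hdig
    exact ⟨m, hm2, by simpa [List.mem_range] using hm, hm3⟩
  have hpos : ∀ m, 0 ≤ dep (s.toList.take m) := by
    intro m
    rcases Nat.lt_or_ge m (s.toList.length + 1) with h | h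
    · exact h1 m (by simpa [List.mem_range] using h)
    · rw [List.take_of_length_le (by omega)]; omega
  exact (build s.toList.length s.toList le_rfl 0 hnl (by intro h; omega)).1 hpos h2

-- ===== VERDICT (by name: the statement is the Claim_ definition above) =====
theorem stacky_spec : Claim_equal_stacky := by
  intro s _ hpre
  unfold Spec_stacky stacky stacky_alt
  congr 1
  exact top_sim (pre_top hpre) s.toList.length 0 [] [] le_rfl
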